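-- pv_equiv track=rewrite | github.com/Commencethescourge/erdos-straus-solver | cloud_coordinator.py | split_ranges
-- ===== SOURCE A (Python) =====
-- import math
--
-- def generate_hard_residues(start, end):
--     """Generate n values where n mod 24 in {1, 17}."""
--     return [n for n in range(start, end + 1) if n % 24 in (1, 17)]
--
-- def split_ranges(start, end, num_chunks):
--     """Split a range into num_chunks roughly equal sub-ranges."""
--     total = end - start + 1
--     chunk_size = math.ceil(total / num_chunks)
--     ranges = []
--     for i in range(num_chunks):
--         c_start = start + i * chunk_size
--         c_end = min(start + (i + 1) * chunk_size - 1, end)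
--         if c_start <= end:
--             targets = len(generate_hard_residues(c_start, c_end))
--             ranges.append((c_start, c_end, targets))
--     return ranges
-- ===== SOURCE B (Python) =====
-- def _count_res(a, b, r):
--     """Closed-form count of n in [a, b] with n % 24 == r (0 <= r < 24)."""
--     return (b - r) // 24 - (a - 1 - r) // 24
--
-- def split_ranges(start, end, num_chunks):
--     """Split a range into num_chunks roughly equal sub-ranges."""
--     if num_chunks < 0 or end < start:
--         return []
--     step = (end - start) // num_chunks + 1
--     return [
--         (s, min(s + step - 1, end),
--          _count_res(s, min(s + step - 1, end), 1) + _count_res(s, min(s + step - 1, end), 17))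
--         for s in range(start, end + 1, step)
--     ]
-- ===== Notes on version B (the rewrite author's own statement) =====
-- stated objective: alternative
-- what changed: A runs an index loop over range(num_chunks) with a guard and scans every integer of each chunk to count residues 1,17 mod 24; B enumerates the emitted chunk starts directly as range(start, end+1, step) (no index loop, no guard) and counts each chunk's residues in closed form with floor divisions, removing the per-integer scan.
import Mathlib
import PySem

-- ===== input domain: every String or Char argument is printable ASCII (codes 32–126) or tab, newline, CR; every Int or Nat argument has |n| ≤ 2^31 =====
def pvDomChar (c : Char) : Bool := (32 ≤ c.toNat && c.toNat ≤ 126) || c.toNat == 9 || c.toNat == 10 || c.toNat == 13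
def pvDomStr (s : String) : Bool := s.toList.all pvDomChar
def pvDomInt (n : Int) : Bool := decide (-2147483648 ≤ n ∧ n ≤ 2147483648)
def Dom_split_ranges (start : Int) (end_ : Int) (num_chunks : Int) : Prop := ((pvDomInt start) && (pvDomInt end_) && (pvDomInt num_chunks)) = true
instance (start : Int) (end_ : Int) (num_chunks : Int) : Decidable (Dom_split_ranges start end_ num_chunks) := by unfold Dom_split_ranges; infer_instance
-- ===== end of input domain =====

-- B replaces A's guarded index loop (which scans every integer of each chunk to count the
-- residues 1 and 17 mod 24) by a direct enumeration of the chunk starts as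
-- range(start, end+1, step) with a closed-form floor-division count per chunk.

-- ===== PORT A =====
def generate_hard_residues (start : Int) (end_ : Int) : List Int :=
  (PySem.List.pyRange start (end_ + 1) 1).filter
    (fun n => PySem.Int.mod n 24 == 1 || PySem.Int.mod n 24 == 17)

-- math.ceil(total / num_chunks): on Dom (|total| ≤ 2^32+1) the float division never rounds
-- across an integer, so it is exactly the integer ceiling, ported as -((-total) // num_chunks).
def split_ranges (start : Int) (end_ : Int) (num_chunks : Int) : List (Int × Int × Int) :=
  let total := end_ - start + 1
  let chunk_size := -(PySem.Int.floordiv (-total) num_chunks)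
  (PySem.List.pyRange 0 num_chunks 1).foldl (fun ranges i =>
    let c_start := start + i * chunk_size
    let c_end := min (start + (i + 1) * chunk_size - 1) end_
    if c_start ≤ end_ then
      ranges ++ [(c_start, c_end, ((generate_hard_residues c_start c_end).length : Int))]
    else ranges) []

-- ===== PORT B =====
def countRes (a : Int) (b : Int) (r : Int) : Int :=
  PySem.Int.floordiv (b - r) 24 - PySem.Int.floordiv (a - 1 - r) 24

def split_ranges_alt (start : Int) (end_ : Int) (num_chunks : Int) : List (Int × Int × Int) :=
  if num_chunks < 0 ∨ end_ < start then []
  else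
    let step := PySem.Int.floordiv (end_ - start) num_chunks + 1
    (PySem.List.pyRange start (end_ + 1) step).map (fun s =>
      let e := min (s + step - 1) end_
      (s, e, countRes s e 1 + countRes s e 17))

-- ===== PRECONDITION & SPEC =====
-- Pre_ excludes only num_chunks = 0, where Python A raises ZeroDivisionError.
def Pre_split_ranges (start : Int) (end_ : Int) (num_chunks : Int) : Prop := num_chunks ≠ 0
instance (start : Int) (end_ : Int) (num_chunks : Int) : Decidable (Pre_split_ranges start end_ num_chunks) := by unfold Pre_split_ranges; infer_instance
def pvWitness_split_ranges : Int × Int × Int := (1, 100, 4)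
def Spec_split_ranges (start : Int) (end_ : Int) (num_chunks : Int) (out : List (Int × Int × Int)) : Prop := out = split_ranges_alt start end_ num_chunks
instance (start : Int) (end_ : Int) (num_chunks : Int) (out : List (Int × Int × Int)) : Decidable (Spec_split_ranges start end_ num_chunks out) := by unfold Spec_split_ranges; infer_instance

-- ===== CLAIM (what is proved, stated in full; the proofs are below) =====
def Claim_equal_split_ranges : Prop := ∀ (start : Int) (end_ : Int) (num_chunks : Int), Dom_split_ranges start end_ num_chunks → Pre_split_ranges start end_ num_chunks → Spec_split_ranges start end_ num_chunks (split_ranges start end_ num_chunks)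

-- ===== LEMMAS AND PROOFS =====

-- one-step difference of the closed-form count is the residue indicator
lemma count_step (a b : Int) :
    (countRes a b 1 + countRes a b 17) - (countRes (a + 1) b 1 + countRes (a + 1) b 17)
      = if (PySem.Int.mod a 24 == 1 || PySem.Int.mod a 24 == 17) then (1 : Int) else 0 := by
  simp only [countRes, PySem.Int.floordiv_eq_ediv_of_pos (show (0:Int) < 24 by norm_num),
    PySem.Int.mod_eq_emod_of_pos (show (0:Int) < 24 by norm_num), Bool.or_eq_true, beq_iff_eq]
  split_ifs with h <;> omega

lemma count_closed : ∀ (n : Nat) (a b : Int), (b + 1 - a).toNat = n → a ≤ b + 1 →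
    (((PySem.List.pyRange a (b + 1) 1).filter
        (fun m => PySem.Int.mod m 24 == 1 || PySem.Int.mod m 24 == 17)).length : Int)
      = countRes a b 1 + countRes a b 17 := by
  intro n
  induction n with
  | zero =>
    intro a b h0 hle
    have hab : a = b + 1 := by omega
    subst hab
    rw [PySem.List.pyRange_one_eq_nil (le_refl _)]
    simp [countRes]
  | succ n ih =>
    intro a b h0 hle
    have hlt : a < b + 1 := by omega
    rw [PySem.List.pyRange_one_cons hlt, List.filter_cons]
    have hrec := ih (a + 1) b (by omega) (by omega)
    have hstep := count_step a b
    by_cases hp : (PySem.Int.mod a 24 == 1 || PySem.Int.mod a 24 == 17) = true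
    · rw [hp] at hstep
      simp only [if_true] at hstep
      simp only [hp, if_true, List.length_cons]
      push_cast
      omega
    · rw [Bool.not_eq_true] at hp
      rw [hp] at hstep
      simp only [Bool.false_eq_true, if_false] at hstep
      simp only [hp, Bool.false_eq_true, if_false]
      omega

lemma targets_eq (a b : Int) (h : a ≤ b + 1) :
    ((generate_hard_residues a b).length : Int) = countRes a b 1 + countRes a b 17 :=
  count_closed (b + 1 - a).toNat a b rfl h

-- A's guarded foldl as filter-then-map
lemma A_filter (s e n : Int) :
    split_ranges s e n =
      ((PySem.List.pyRange 0 n 1).filter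
          (fun i => decide (s + i * (-(PySem.Int.floordiv (-(e - s + 1)) n)) ≤ e))).map
        (fun i => (s + i * (-(PySem.Int.floordiv (-(e - s + 1)) n)),
          min (s + (i + 1) * (-(PySem.Int.floordiv (-(e - s + 1)) n)) - 1) e,
          ((generate_hard_residues (s + i * (-(PySem.Int.floordiv (-(e - s + 1)) n)))
            (min (s + (i + 1) * (-(PySem.Int.floordiv (-(e - s + 1)) n)) - 1) e)).length : Int))) := by
  have h := PySem.List.foldl_append_if
    (fun i => decide (s + i * (-(PySem.Int.floordiv (-(e - s + 1)) n)) ≤ e))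
    (fun i => (s + i * (-(PySem.Int.floordiv (-(e - s + 1)) n)),
      min (s + (i + 1) * (-(PySem.Int.floordiv (-(e - s + 1)) n)) - 1) e,
      ((generate_hard_residues (s + i * (-(PySem.Int.floordiv (-(e - s + 1)) n)))
        (min (s + (i + 1) * (-(PySem.Int.floordiv (-(e - s + 1)) n)) - 1) e)).length : Int)))
    (PySem.List.pyRange 0 n 1) []
  simp only [decide_eq_true_eq, List.nil_append] at h
  exact h

-- ===== VERDICT (by name: the statement is the Claim_ definition above) =====
theorem split_ranges_spec : Claim_equal_split_ranges := by
  intro s e n _ hn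
  unfold Spec_split_ranges
  rw [A_filter s e n]
  rcases lt_trichotomy n 0 with hneg | h0 | hpos
  · rw [PySem.List.pyRange_one_eq_nil (show n ≤ 0 by omega)]
    simp [split_ranges_alt, hneg]
  · exact absurd h0 hn
  · set c := -(PySem.Int.floordiv (-(e - s + 1)) n) with hcdef
    have hchar : (c - 1) * n < e - s + 1 ∧ e - s + 1 ≤ c * n :=
      (PySem.Int.neg_floordiv_neg_eq_iff_of_pos hpos).mp hcdef.symm
    by_cases hse : e < s
    · have hfil : (PySem.List.pyRange 0 n 1).filter (fun i => decide (s + i * c ≤ e)) = [] := by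
        rw [List.filter_eq_nil_iff]
        intro i hi
        rw [PySem.List.mem_pyRange_one] at hi
        simp only [decide_eq_true_eq, not_le]
        have hc0 : c ≤ 0 := by
          by_contra hcp
          push_neg at hcp
          have h1 : 0 ≤ (c - 1) * n := mul_nonneg (by omega) (by omega)
          linarith [hchar.1]
        have h1 : (n - 1) * c ≤ i * c := mul_le_mul_of_nonpos_right (by omega) hc0
        have h2 : c * n = n * c := mul_comm c n
        have h3 : (n - 1) * c = n * c - c := by ring
        linarith [hchar.2]
      rw [hfil]
      simp [split_ranges_alt, hse]
    · push_neg at hse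
      have hc1 : 1 ≤ c := by
        by_contra hcl
        push_neg at hcl
        have h1 : c * n ≤ 0 * n := mul_le_mul_of_nonneg_right (by omega) (by omega)
        have h2 : (0 : Int) * n = 0 := zero_mul n
        linarith [hchar.2]
      have hstep : PySem.Int.floordiv (e - s) n + 1 = c := by
        rw [hcdef]
        symm
        rw [PySem.Int.neg_floordiv_neg_eq_iff_of_pos hpos,
          PySem.Int.floordiv_eq_ediv_of_pos hpos]
        have hdm := Int.ediv_add_emod (e - s) n
        have hr0 := Int.emod_nonneg (e - s) (show n ≠ 0 by omega)
        have hrlt := Int.emod_lt_of_pos (e - s) hpos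
        constructor
        · have hx : (PySem.Int.floordiv (e - s) n + 1 - 1) * n = n * ((e - s) / n) := by
            rw [PySem.Int.floordiv_eq_ediv_of_pos hpos]; ring
          linarith [hx]
        · have hx : (PySem.Int.floordiv (e - s) n + 1) * n = n * ((e - s) / n) + n := by
            rw [PySem.Int.floordiv_eq_ediv_of_pos hpos]; ring
          linarith [hx]
      set Kz := (e - s + 1 + c - 1) / c with hKz
      have hdm2 := Int.ediv_add_emod (e - s + 1 + c - 1) c
      rw [← hKz] at hdm2
      have hr20 := Int.emod_nonneg (e - s + 1 + c - 1) (show c ≠ 0 by omega)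
      have hr2lt := Int.emod_lt_of_pos (e - s + 1 + c - 1) (show 0 < c by omega)
      have hKnn : 0 ≤ Kz := Int.ediv_nonneg (by omega) (by omega)
      have hKle : Kz ≤ n := by
        by_contra h
        push_neg at h
        have h1 : c * (n + 1) ≤ c * Kz := by
          apply mul_le_mul_of_nonneg_left (by omega) (by omega)
        have h2 : c * (n + 1) = c * n + c := by ring
        linarith [hchar.2]
      have hguard : ∀ k : Int, 0 ≤ k → ((s + k * c ≤ e) ↔ k < Kz) := by
        intro k hk0
        constructor
        · intro hk
          by_contra hK
          push_neg at hK
          have h1 : c * Kz ≤ c * k := mul_le_mul_of_nonneg_left hK (by omega)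
          have h2 : k * c = c * k := mul_comm k c
          linarith
        · intro hk
          have h1 : c * k ≤ c * (Kz - 1) := mul_le_mul_of_nonneg_left (by omega) (by omega)
          have h2 : c * (Kz - 1) = c * Kz - c := by ring
          have h3 : k * c = c * k := mul_comm k c
          linarith
      rw [PySem.List.pyRange_one 0 n, List.filter_map]
      unfold split_ranges_alt
      simp only [if_neg (show ¬(n < 0 ∨ e < s) by omega)]
      rw [hstep, PySem.List.pyRange_of_pos s (e + 1) (show 0 < c by omega),
        if_pos (show s < e + 1 by omega),
        show e + 1 - s + c - 1 = e - s + 1 + c - 1 by ring, ← hKz]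
      have hrange : (n - 0).toNat = Kz.toNat + ((n - 0).toNat - Kz.toNat) := by omega
      rw [hrange, List.range_add, List.filter_append]
      have hfil1 : List.filter ((fun i => decide (s + i * c ≤ e)) ∘ fun k => (0 : Int) + ↑k)
          (List.range Kz.toNat) = List.range Kz.toNat := by
        rw [List.filter_eq_self]
        intro k hk
        rw [List.mem_range] at hk
        simp only [Function.comp_apply, decide_eq_true_eq, zero_add]
        exact (hguard k (by positivity)).mpr (by omega)
      have hfil2 : List.filter ((fun i => decide (s + i * c ≤ e)) ∘ fun k : Nat => (0 : Int) + (k : Int))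
          (List.map (fun x : Nat => Kz.toNat + x) (List.range ((n - 0).toNat - Kz.toNat))) = [] := by
        rw [List.filter_eq_nil_iff]
        intro a ha
        rw [List.mem_map] at ha
        obtain ⟨x, _, rfl⟩ := ha
        simp only [Function.comp_apply, decide_eq_true_eq, zero_add]
        intro hle
        push_cast at hle
        have := (hguard ((Kz.toNat : Int) + (x : Int)) (by positivity)).mp hle
        omega
      rw [hfil1, hfil2, List.append_nil, List.map_map, List.map_map]
      apply List.map_congr_left
      intro k hk
      rw [List.mem_range] at hk
      have hkz : ((k : Int)) < Kz := by omega
      have hg : s + (k : Int) * c ≤ e := (hguard k (by positivity)).mpr hkz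
      simp only [Function.comp_apply]
      have e1 : s + ((0 : Int) + (k : Int)) * c = s + c * k := by ring
      have e2 : s + (((0 : Int) + (k : Int)) + 1) * c - 1 = s + c * k + c - 1 := by ring
      rw [e1, e2]
      have hmin : s + c * k ≤ min (s + c * k + c - 1) e + 1 := by
        have h1 : s + c * k ≤ e := by linarith [mul_comm (k : Int) c]
        omega
      rw [targets_eq _ _ hmin]
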